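-- pv_equiv track=rewrite | github.com/jeppeter/shlib | bashcompletion/bashcomplete_format_debug.py | __get_bash_string
-- ===== SOURCE A (Python) =====
-- def __get_bash_string(ins):
--     rets = ''
--     for c in ins:
--         if c == '$':
--             rets += '\\'
--             rets += '$'
--         elif c == '\\':
--             rets += '\\\\'
--         elif c == '`':
--             rets += '\\`'
--         else:
--             rets += c
--     return rets
-- ===== SOURCE B (Python) =====
-- def __get_bash_string(ins):
--     # Three chained library replace passes; backslash is escaped first so the
--     # backslashes inserted for '$' and '`' are never re-escaped.
--     return ins.replace('\\', '\\\\').replace('$', '\\$').replace('`', '\\`')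
-- ===== Notes on version B (the rewrite author's own statement) =====
-- stated objective: idiomatic
-- what changed: Replaced the per-character branching accumulation loop with three chained str.replace passes (backslash escaped first so inserted backslashes are not re-escaped).
import Mathlib
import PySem

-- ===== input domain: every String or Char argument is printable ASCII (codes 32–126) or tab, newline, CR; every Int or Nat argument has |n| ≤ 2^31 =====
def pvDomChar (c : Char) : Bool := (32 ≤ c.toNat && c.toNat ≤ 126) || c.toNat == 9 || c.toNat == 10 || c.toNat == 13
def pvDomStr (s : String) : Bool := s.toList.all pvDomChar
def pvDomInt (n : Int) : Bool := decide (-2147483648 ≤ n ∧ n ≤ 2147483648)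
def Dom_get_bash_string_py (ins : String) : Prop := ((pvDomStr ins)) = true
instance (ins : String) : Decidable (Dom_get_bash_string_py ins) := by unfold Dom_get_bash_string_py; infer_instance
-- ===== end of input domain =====

-- B replaces A's per-character branching loop by three chained replace passes
-- (backslash first, so inserted backslashes are never re-escaped); idiomatic, same cost.

-- ===== PORT A =====
def get_bash_string_py (ins : String) : String :=
  ins.toList.foldl (fun rets c =>
    if c = '$' then (rets ++ "\\") ++ "$"
    else if c = '\\' then rets ++ "\\\\"
    else if c = '`' then rets ++ "\\`"
    else rets.push c) ""

-- ===== PORT B =====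
def get_bash_string_py_alt (ins : String) : String :=
  PySem.Str.replace (PySem.Str.replace (PySem.Str.replace ins "\\" "\\\\") "$" "\\$") "`" "\\`"

-- ===== PRECONDITION & SPEC =====
def Spec_get_bash_string_py (ins : String) (out : String) : Prop := out = get_bash_string_py_alt ins
instance (ins : String) (out : String) : Decidable (Spec_get_bash_string_py ins out) := by unfold Spec_get_bash_string_py; infer_instance

-- ===== CLAIM (what is proved, stated in full; the proofs are below) =====
def Claim_equal_get_bash_string_py : Prop := ∀ (ins : String), Dom_get_bash_string_py ins → Spec_get_bash_string_py ins (get_bash_string_py ins)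

-- ===== LEMMAS AND PROOFS =====

/-- Single-character replacement, as a flatMap over the characters. -/
def escOne (a : Char) (r : List Char) (l : List Char) : List Char :=
  l.flatMap (fun c => if c = a then r else [c])

theorem escOne_nil (a : Char) (r : List Char) : escOne a r [] = [] := rfl

theorem escOne_cons (a : Char) (r : List Char) (c : Char) (l : List Char) :
    escOne a r (c :: l) = (if c = a then r else [c]) ++ escOne a r l := by
  simp [escOne]

/-- `Chars.replace.go` with a single-character pattern and enough fuel computes `escOne`. -/
theorem go_escOne (a : Char) (r : List Char) :
    ∀ (l : List Char) (fuel : Nat) (acc : List Char), l.length ≤ fuel →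
      PySem.Chars.replace.go [a] r fuel l acc = acc.reverse ++ escOne a r l := by
  intro l
  induction l with
  | nil =>
      intro fuel acc h
      cases fuel <;> simp [PySem.Chars.replace.go, escOne]
  | cons c t ih =>
      intro fuel acc h
      cases fuel with
      | zero => simp at h
      | succ n =>
        simp only [PySem.Chars.replace.go]
        by_cases hc : c = a
        · subst hc
          have hpre : List.isPrefixOf [c] (c :: t) = true := by
            simp [List.isPrefixOf]
          simp only [hpre, if_true]
          rw [show List.drop (List.length [c]) (c :: t) = t from rfl]
          rw [ih n (r.reverse ++ acc) (by simpa using Nat.le_of_succ_le_succ h)]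
          simp [escOne_cons]
        · have hpre : List.isPrefixOf [a] (c :: t) = false := by
            simp [List.isPrefixOf]
            intro hh; exact absurd hh.symm hc
          simp only [hpre, Bool.false_eq_true, if_false]
          rw [ih n (c :: acc) (by simpa using Nat.le_of_succ_le_succ h)]
          simp [escOne_cons, hc]

/-- `Chars.replace` with a single-character pattern is `escOne`. -/
theorem replace_single (a : Char) (r : List Char) (l : List Char) :
    PySem.Chars.replace l [a] r = escOne a r l := by
  have hne : ([a] : List Char).isEmpty = false := rfl
  simp only [PySem.Chars.replace, hne, Bool.false_eq_true, if_false]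
  exact go_escOne a r l l.length [] (Nat.le_refl _)

/-- What A's loop produces, per character. -/
def escA (c : Char) : List Char :=
  if c = '$' then ['\\', '$']
  else if c = '\\' then ['\\', '\\']
  else if c = '`' then ['\\', '`']
  else [c]

theorem foldA_toList (l : List Char) :
    ∀ (acc : String),
      (l.foldl (fun rets c =>
        if c = '$' then (rets ++ "\\") ++ "$"
        else if c = '\\' then rets ++ "\\\\"
        else if c = '`' then rets ++ "\\`"
        else rets.push c) acc).toList = acc.toList ++ l.flatMap escA := by
  induction l with
  | nil => intro acc; simp
  | cons c t ih =>
      intro acc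
      simp only [List.foldl_cons, List.flatMap_cons]
      by_cases h1 : c = '$'
      · subst h1; rw [ih]; simp [escA]
      · by_cases h2 : c = '\\'
        · subst h2; rw [ih]; simp [escA]
        · by_cases h3 : c = '`'
          · subst h3; rw [ih]; simp [escA]
          · simp only [if_neg h1, if_neg h2, if_neg h3]
            rw [ih]; simp [escA, h1, h2, h3]

/-- The composition of the three single-character passes equals A's per-character escape. -/
theorem three_passes (l : List Char) :
    escOne '`' ['\\', '`'] (escOne '$' ['\\', '$'] (escOne '\\' ['\\', '\\'] l))
      = l.flatMap escA := by
  induction l with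
  | nil => rfl
  | cons c t ih =>
      simp only [escOne_cons, List.flatMap_cons]
      have hdist : ∀ (a : Char) (r x y : List Char),
          escOne a r (x ++ y) = escOne a r x ++ escOne a r y := by
        intro a r x y; simp [escOne]
      rw [hdist, hdist, ih]
      congr 1
      by_cases h1 : c = '$'
      · subst h1; decide
      · by_cases h2 : c = '\\'
        · subst h2; decide
        · by_cases h3 : c = '`'
          · subst h3; decide
          · simp [escA, h1, h2, h3, escOne_cons, escOne_nil]

-- ===== VERDICT (by name: the statement is the Claim_ definition above) =====
theorem get_bash_string_py_spec : Claim_equal_get_bash_string_py := by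
  intro ins _
  unfold Spec_get_bash_string_py get_bash_string_py get_bash_string_py_alt
  apply String.toList_injective  -- compare as char lists
  simp only [PySem.Str.replace, String.toList_ofList]
  rw [foldA_toList]
  simp only [String.toList_empty, List.nil_append]
  rw [show ("\\" : String).toList = ['\\'] from rfl,
      show ("\\\\" : String).toList = ['\\','\\'] from rfl,
      show ("$" : String).toList = ['$'] from rfl,
      show ("\\$" : String).toList = ['\\','$'] from rfl,
      show ("`" : String).toList = ['`'] from rfl,
      show ("\\`" : String).toList = ['\\','`'] from rfl]
  rw [replace_single, replace_single, replace_single, three_passes]
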